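-- pv_equiv track=rewrite | github.com/TimoKats/pylan | misc/make_docs.py | convert_code_lines_to_block
-- ===== SOURCE A (Python) =====
-- def convert_code_lines_to_block(markdown_string):
--     """Convert lines starting with '>>>' to Markdown code blocks."""
--     lines = markdown_string.split("\n")
--     in_code_block = False
--     result = []
--
--     for line in lines:
--         if line.strip().startswith(">>>") and not in_code_block:
--             result.append("```python")
--             in_code_block = True
--         elif in_code_block and not line.strip().startswith(">>>"):
--             result.append("```")
--             in_code_block = False
--         result.append(line)
--
--     if in_code_block:
--         result.append("```")
--
--     return "\n".join(result)
-- ===== SOURCE B (Python) =====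
-- def convert_code_lines_to_block(markdown_string):
--     """Convert lines starting with '>>>' to Markdown code blocks."""
--     lines = markdown_string.split("\n")
--     out = []
--     i, n = 0, len(lines)
--     while i < n:
--         is_code = lines[i].strip().startswith(">>>")
--         j = i
--         while j < n and lines[j].strip().startswith(">>>") == is_code:
--             j += 1
--         if is_code:
--             out.append("```python")
--             out.extend(lines[i:j])
--             out.append("```")
--         else:
--             out.extend(lines[i:j])
--         i = j
--     return "\n".join(out)
-- ===== Notes on version B (the rewrite author's own statement) =====
-- stated objective: alternative
-- what changed: B groups consecutive lines into maximal runs keyed by whether the stripped line starts with the doctest prompt and emits one whole fenced block per code run, instead of A's line-by-line toggling of an in_code_block flag.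
import Mathlib
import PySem

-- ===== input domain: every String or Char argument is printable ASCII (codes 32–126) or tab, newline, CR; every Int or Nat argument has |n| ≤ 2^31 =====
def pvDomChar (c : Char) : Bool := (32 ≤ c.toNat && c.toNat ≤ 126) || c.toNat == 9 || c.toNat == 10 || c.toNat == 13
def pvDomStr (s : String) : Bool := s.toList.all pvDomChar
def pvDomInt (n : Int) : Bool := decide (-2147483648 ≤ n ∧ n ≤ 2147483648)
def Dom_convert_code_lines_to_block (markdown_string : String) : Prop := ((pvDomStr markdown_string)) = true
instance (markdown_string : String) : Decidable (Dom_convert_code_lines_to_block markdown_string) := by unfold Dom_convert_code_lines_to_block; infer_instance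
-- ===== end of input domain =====

-- B emits a whole fenced block per maximal run of '>>>' lines instead of toggling a flag line by line.
-- Equivalence of the return values is proved on all inputs (A is total).

-- line.strip().startswith(">>>")
def pvIsCode (line : String) : Bool :=
  PySem.Str.startswith (PySem.Str.strip line) ">>>"

-- ===== PORT A =====
-- A's for-loop over the lines, carrying (in_code_block, result) exactly as the Python does
def pvLoopA : List String → Bool → List String → Bool × List String
  | [], inCode, res => (inCode, res)
  | l :: ls, inCode, res =>
    if pvIsCode l && !inCode then
      pvLoopA ls true ((res ++ ["```python"]) ++ [l])
    else if inCode && !pvIsCode l then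
      pvLoopA ls false ((res ++ ["```"]) ++ [l])
    else
      pvLoopA ls inCode (res ++ [l])

def convert_code_lines_to_block (markdown_string : String) : String :=
  let lines := ((PySem.Str.split? markdown_string "\n").getD [])
  let (inCode, res) := pvLoopA lines false []
  PySem.Str.join "\n" (if inCode then res ++ ["```"] else res)

-- ===== PORT B =====
-- B's outer while: take the maximal run with the same pvIsCode key, emit it (fenced if code), recurse on the rest
def pvGroups : List String → List String
  | [] => []
  | l :: ls =>
    let k := pvIsCode l
    let run := l :: ls.takeWhile (fun x => pvIsCode x == k)
    let rest := ls.dropWhile (fun x => pvIsCode x == k)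
    (if k then "```python" :: run ++ ["```"] else run) ++ pvGroups rest
termination_by ls => ls.length
decreasing_by
  simp only [List.length_cons]
  exact Nat.lt_succ_of_le (List.length_dropWhile_le _ _)

def convert_code_lines_to_block_alt (markdown_string : String) : String :=
  PySem.Str.join "\n" (pvGroups (((PySem.Str.split? markdown_string "\n").getD [])))

-- ===== PRECONDITION & SPEC =====
def Spec_convert_code_lines_to_block (markdown_string : String) (out : String) : Prop := out = convert_code_lines_to_block_alt markdown_string
instance (markdown_string : String) (out : String) : Decidable (Spec_convert_code_lines_to_block markdown_string out) := by unfold Spec_convert_code_lines_to_block; infer_instance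

-- ===== CLAIM (what is proved, stated in full; the proofs are below) =====
def Claim_equal_convert_code_lines_to_block : Prop := ∀ (markdown_string : String), Dom_convert_code_lines_to_block markdown_string → Spec_convert_code_lines_to_block markdown_string (convert_code_lines_to_block markdown_string)

-- ===== LEMMAS AND PROOFS =====

-- A's output tail from a given flag, without the accumulator
def pvSpecOut : List String → Bool → List String
  | [], c => if c then ["```"] else []
  | l :: ls, c =>
    if pvIsCode l && !c then "```python" :: l :: pvSpecOut ls true
    else if c && !pvIsCode l then "```" :: l :: pvSpecOut ls false
    else l :: pvSpecOut ls c

theorem pvLoopA_spec (ls : List String) : ∀ (c : Bool) (res : List String),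
    (let p := pvLoopA ls c res; (if p.1 then p.2 ++ ["```"] else p.2)) = res ++ pvSpecOut ls c := by
  induction ls with
  | nil => intro c res; cases c <;> simp [pvLoopA, pvSpecOut]
  | cons l ls ih =>
    intro c res
    by_cases h : pvIsCode l = true <;> cases c <;>
      simp [pvLoopA, pvSpecOut, h, ih]

theorem pvSpecOut_true (ls : List String) :
    pvSpecOut ls true = ls.takeWhile pvIsCode ++ "```" :: pvSpecOut (ls.dropWhile pvIsCode) false := by
  induction ls with
  | nil => simp [pvSpecOut]
  | cons l ls ih =>
    by_cases h : pvIsCode l = true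
    · simp [pvSpecOut, h, ih]
    · simp only [Bool.not_eq_true] at h
      simp [pvSpecOut, h]

theorem pvGroups_cons_false (l : String) (ls : List String) (h : pvIsCode l = false) :
    pvGroups (l :: ls) = l :: pvGroups ls := by
  cases ls with
  | nil => simp [pvGroups, h]
  | cons x xs =>
    by_cases hx : pvIsCode x = true
    · rw [pvGroups]
      simp only [h, hx, List.takeWhile_cons, List.dropWhile_cons]
      rw [pvGroups.eq_def]
      conv_rhs => rw [pvGroups.eq_def]
      simp [hx]
    · simp only [Bool.not_eq_true] at hx
      rw [pvGroups, pvGroups]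
      simp [h, hx]

theorem pvSpecOut_eq_pvGroups : ∀ (n : ℕ) (ls : List String), ls.length ≤ n →
    pvSpecOut ls false = pvGroups ls := by
  intro n
  induction n with
  | zero => intro ls h; simp at h; simp [h, pvSpecOut, pvGroups]
  | succ n ih =>
    intro ls h
    cases ls with
    | nil => simp [pvSpecOut, pvGroups]
    | cons l ls =>
      simp only [List.length_cons, Nat.succ_le_succ_iff] at h
      by_cases hl : pvIsCode l = true
      · rw [pvGroups]
        have hrest := ih (ls.dropWhile pvIsCode)
          (le_trans (List.length_dropWhile_le _ _) h)
        simp [pvSpecOut, hl, pvSpecOut_true, hrest]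
      · simp only [Bool.not_eq_true] at hl
        rw [pvGroups_cons_false l ls hl, ← ih ls h]
        simp [pvSpecOut, hl]

-- ===== VERDICT (by name: the statement is the Claim_ definition above) =====
theorem convert_code_lines_to_block_spec : Claim_equal_convert_code_lines_to_block := by
  intro s _
  show _ = _
  unfold convert_code_lines_to_block convert_code_lines_to_block_alt
  have h := pvLoopA_spec (((PySem.Str.split? s "\n").getD [])) false []
  simp only [List.nil_append] at h
  simp only [h, pvSpecOut_eq_pvGroups (((PySem.Str.split? s "\n").getD [])).length _ le_rfl]
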